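-- pv_equiv track=rewrite | github.com/tmu-nlp/100knock2017 | katsumata/chapter05/knock49.py | binoun
-- ===== SOURCE A (Python) =====
-- def binoun(noun_list):
--     noun_list2 = list()
--     for i in noun_list:
--         for j in reversed(noun_list):
--             if i == j :
--                 break
--             noun_list2.append((i,j))
--     return noun_list2
-- ===== SOURCE B (Python) =====
-- def binoun(noun_list):
--     # One right-to-left pass: the first time a value is met (its last occurrence),
--     # its ready-made pair list is exactly the elements already visited, in visit
--     # order; memoize it per distinct value, then flatten in original order.
--     pairs = {}
--     rev_tail = []
--     for v in reversed(noun_list):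
--         if v not in pairs:
--             pairs[v] = [(v, j) for j in rev_tail]
--         rev_tail.append(v)
--     return [p for v in noun_list for p in pairs[v]]
-- ===== Notes on version B (the rewrite author's own statement) =====
-- stated objective: alternative
-- what changed: Replaces A's per-element reversed scan-until-equal with one right-to-left pass that memoizes each distinct value's complete pair list at its last occurrence, followed by a flatten of those memoized lists in original order.
import Mathlib
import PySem

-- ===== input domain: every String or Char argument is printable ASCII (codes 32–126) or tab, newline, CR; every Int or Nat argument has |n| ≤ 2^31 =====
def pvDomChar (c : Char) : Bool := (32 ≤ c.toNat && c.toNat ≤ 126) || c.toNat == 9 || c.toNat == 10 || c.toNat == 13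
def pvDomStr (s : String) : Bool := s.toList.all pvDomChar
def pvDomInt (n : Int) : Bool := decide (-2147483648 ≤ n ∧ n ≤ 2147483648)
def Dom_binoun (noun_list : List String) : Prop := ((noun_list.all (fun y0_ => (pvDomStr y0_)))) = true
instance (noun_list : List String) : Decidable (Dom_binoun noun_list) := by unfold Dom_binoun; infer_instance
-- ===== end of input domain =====

-- B replaces A's per-element reversed scan-until-equal by a single right-to-left
-- pass memoizing each distinct value's pair list at its last occurrence, then a
-- flatten in original order (alternative decomposition, same result).

-- ===== PORT A =====
-- inner loop: 'for j in reversed(noun_list): if i == j: break; append (i, j)'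
def innerA (i : String) : List String → List (String × String)
  | [] => []
  | j :: rest => if i == j then [] else (i, j) :: innerA i rest

def binoun (noun_list : List String) : List (String × String) :=
  noun_list.foldl (fun acc i => acc ++ innerA i noun_list.reverse) []

-- ===== PORT B =====
-- loop body: 'if v not in pairs: pairs[v] = [(v, j) for j in rev_tail]; rev_tail.append(v)'
def stepB (st : PySem.Dict String (List (String × String)) × List String) (v : String) :
    PySem.Dict String (List (String × String)) × List String :=
  (if st.1.contains v then st.1 else st.1.insert v (st.2.map (fun j => (v, j))),
   st.2 ++ [v])

def binoun_alt (noun_list : List String) : List (String × String) :=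
  let st := noun_list.reverse.foldl stepB (PySem.Dict.empty, [])
  -- 'return [p for v in noun_list for p in pairs[v]]'
  noun_list.flatMap (fun v => st.1.getD v [])

-- ===== PRECONDITION & SPEC =====
def Spec_binoun (noun_list : List String) (out : List (String × String)) : Prop := out = binoun_alt noun_list
instance (noun_list : List String) (out : List (String × String)) : Decidable (Spec_binoun noun_list out) := by unfold Spec_binoun; infer_instance

-- ===== CLAIM (what is proved, stated in full; the proofs are below) =====
def Claim_equal_binoun : Prop := ∀ (noun_list : List String), Dom_binoun noun_list → Spec_binoun noun_list (binoun noun_list)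

-- ===== LEMMAS AND PROOFS =====

theorem innerA_eq_takeWhile (i : String) (xs : List String) :
    innerA i xs = (xs.takeWhile (fun j => !(i == j))).map (fun j => (i, j)) := by
  induction xs with
  | nil => rfl
  | cons j rest ih =>
    by_cases h : i = j
    · simp [innerA, h]
    · simp [innerA, h, ih]

-- once a value is in the dict, the rest of the fold never changes its entry
theorem stepB_preserve (v : String) (p : List (String × String)) (xs : List String) :
    ∀ (d : PySem.Dict String (List (String × String))) (acc : List String),
      d.get? v = some p → ((xs.foldl stepB (d, acc)).1).get? v = some p := by
  induction xs with
  | nil => intro d acc h; simpa using h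
  | cons j rest ih =>
    intro d acc h
    simp only [List.foldl_cons, stepB]
    by_cases hc : d.contains j = true
    · simpa [hc] using ih _ _ h
    · have hne : v ≠ j := by
        intro he; subst he
        rw [PySem.Dict.contains_eq_isSome_get?, h] at hc; simp at hc
      have hb : d.contains j = false := by simpa using hc
      simp only [hb, Bool.false_eq_true, if_false]
      exact ih _ _ (by simp [PySem.Dict.get?_insert, hne, h])

-- a value absent from the dict gets, at its first (right-to-left) encounter,
-- the pair list built from the accumulated tail plus the pre-encounter prefix
theorem stepB_getD (v : String) (xs : List String) :
    ∀ (d : PySem.Dict String (List (String × String))) (acc : List String),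
      v ∈ xs → d.get? v = none →
      ((xs.foldl stepB (d, acc)).1).getD v [] =
        (acc ++ xs.takeWhile (fun j => !(v == j))).map (fun j => (v, j)) := by
  induction xs with
  | nil => intro _ _ h; cases h
  | cons j rest ih =>
    intro d acc hmem hnone
    simp only [List.foldl_cons, stepB]
    by_cases hvj : v = j
    · subst hvj
      have hb : d.contains v = false := by
        rw [PySem.Dict.contains_eq_isSome_get?, hnone]; rfl
      simp only [hb, Bool.false_eq_true, if_false]
      have hfin := stepB_preserve v (acc.map (fun j => (v, j))) rest
        (d.insert v (acc.map (fun j => (v, j)))) (acc ++ [v])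
        (by simp)
      rw [PySem.Dict.getD_eq_get?_getD, hfin]
      simp
    · have hmem' : v ∈ rest := by
        rcases List.mem_cons.mp hmem with h1 | h1
        · exact absurd h1 hvj
        · exact h1
      have htw : (j :: rest).takeWhile (fun j => !(v == j))
          = j :: rest.takeWhile (fun j => !(v == j)) := by
        rw [List.takeWhile_cons]
        simp [hvj]
      by_cases hc : d.contains j = true
      · simp only [hc, if_true]
        rw [ih d (acc ++ [j]) hmem' hnone, htw]; simp
      · have hb : d.contains j = false := by simpa using hc
        simp only [hb, Bool.false_eq_true, if_false]
        rw [ih _ (acc ++ [j]) hmem'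
          (by simp [PySem.Dict.get?_insert, hvj, hnone]), htw]
        simp

theorem flatMap_congr_mem (l : List String) (f g : String → List (String × String))
    (h : ∀ v ∈ l, f v = g v) : l.flatMap f = l.flatMap g := by
  induction l with
  | nil => rfl
  | cons a t ih =>
    simp only [List.flatMap_cons, h a (List.mem_cons_self),
      ih (fun v hv => h v (List.mem_cons_of_mem a hv))]

-- ===== VERDICT (by name: the statement is the Claim_ definition above) =====
theorem binoun_spec : Claim_equal_binoun := by
  intro l _
  show binoun l = binoun_alt l
  unfold binoun binoun_alt
  rw [PySem.List.foldl_append_eq_flatMap]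
  simp only [List.nil_append]
  exact flatMap_congr_mem l _ _ (fun v hv => by
    rw [stepB_getD v l.reverse PySem.Dict.empty [] (List.mem_reverse.mpr hv)
      (by simp), innerA_eq_takeWhile]
    simp)
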